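-- pv_equiv track=rewrite | github.com/suryaatevellore/PythonExperiments | requests/main.py | count_friends
-- ===== SOURCE A (Python) =====
-- def count_friends(input):
--     request = 0
--
--     candidates = []
--     for cidx, centaur in enumerate(input):
--         for caidx, candidate in enumerate(input):
--             if caidx == cidx:
--                 continue
--             candidates.append((centaur, candidate))
--
--     for c in candidates:
--         centaur_age = c[0]
--         candidate_age = c[1]
--         if centaur_age > 100 and candidate_age < 100:
--             continue
--         if candidate_age > centaur_age:
--             continue
--
--         if candidate_age <= (centaur_age//2) + 7:
--             continue
--
--         request += 1
--
--     return request
-- ===== SOURCE B (Python) =====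
-- def _advance(s, p, t):
--     # move p forward past every element <= t (s is sorted ascending)
--     while p < len(s) and s[p] <= t:
--         p += 1
--     return p
--
--
-- def count_friends(input):
--     s = sorted(input)
--     total = 0
--     hi = 0  # count of ages <= x (current centaur age)
--     lo = 0  # count of ages <= L (lower cutoff for the current centaur)
--     for x in s:
--         hi = _advance(s, hi, x)
--         L = x // 2 + 7
--         if x > 100 and L < 99:
--             L = 99
--         lo = _advance(s, lo, L)
--         if L < x:
--             total += hi - lo - 1
--     return total
-- ===== Notes on version B (the rewrite author's own statement) =====
-- stated objective: faster
-- what changed: B sorts the ages once and sweeps them with two monotone pointers (count of ages <= x and count of ages <= lower cutoff), replacing A's materialised list of all n*(n-1) ordered pairs and its per-pair rule checks.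
import Mathlib
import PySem

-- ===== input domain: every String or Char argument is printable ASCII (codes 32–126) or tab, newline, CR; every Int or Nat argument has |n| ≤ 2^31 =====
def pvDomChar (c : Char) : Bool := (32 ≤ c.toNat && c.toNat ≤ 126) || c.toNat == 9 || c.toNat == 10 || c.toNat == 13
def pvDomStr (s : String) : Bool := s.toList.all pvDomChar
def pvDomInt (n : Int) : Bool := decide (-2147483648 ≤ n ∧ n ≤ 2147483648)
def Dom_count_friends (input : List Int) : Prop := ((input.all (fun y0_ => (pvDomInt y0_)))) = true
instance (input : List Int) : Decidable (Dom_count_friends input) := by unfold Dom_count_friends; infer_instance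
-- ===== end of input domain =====

-- B replaces A's materialised O(n^2) candidate-pair scan by sort + two monotone pointers (O(n log n)).

-- ===== PORT A =====
def count_friends (input : List Int) : Int :=
  let candidates :=
    (PySem.List.enumerate input).foldl (fun cs c =>
      (PySem.List.enumerate input).foldl (fun cs' ca =>
        if ca.1 == c.1 then cs' else cs' ++ [(c.2, ca.2)]) cs) []
  candidates.foldl (fun request c =>
    let centaur_age := c.1
    let candidate_age := c.2
    if centaur_age > 100 ∧ candidate_age < 100 then request
    else if candidate_age > centaur_age then request
    else if candidate_age ≤ PySem.Int.floordiv centaur_age 2 + 7 then request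
    else request + 1) 0

-- ===== PORT B =====
-- while p < len(s) and s[p] <= t: p += 1
def pvAdvance (s : List Int) (p : Nat) (t : Int) : Nat :=
  if h : p < s.length then
    if s[p] ≤ t then pvAdvance s (p + 1) t else p
  else p
termination_by s.length - p

def count_friends_alt (input : List Int) : Int :=
  let s := PySem.List.sorted input (fun x => x) false
  (s.foldl (fun st x =>
    let hi := pvAdvance s st.2.1 x
    let L0 := PySem.Int.floordiv x 2 + 7
    let L := if x > 100 ∧ L0 < 99 then (99 : Int) else L0
    let lo := pvAdvance s st.2.2 L
    ((if L < x then st.1 + (hi : Int) - (lo : Int) - 1 else st.1), hi, lo))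
    ((0 : Int), 0, 0)).1

-- ===== PRECONDITION & SPEC =====
def Spec_count_friends (input : List Int) (out : Int) : Prop := out = count_friends_alt input
instance (input : List Int) (out : Int) : Decidable (Spec_count_friends input out) := by unfold Spec_count_friends; infer_instance

-- ===== CLAIM (what is proved, stated in full; the proofs are below) =====
def Claim_equal_count_friends : Prop := ∀ (input : List Int), Dom_count_friends input → Spec_count_friends input (count_friends input)

-- ===== LEMMAS AND PROOFS =====

-- ---- proof-only helper definitions ----

def pvL (x : Int) : Int :=
  if x > 100 ∧ PySem.Int.floordiv x 2 + 7 < 99 then 99 else PySem.Int.floordiv x 2 + 7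

def pvW (x y : Int) : Bool := decide (pvL x < y ∧ y ≤ x)

def pvCnt (l : List Int) (t : Int) : Nat := l.countP (fun y => decide (y ≤ t))

def pvF (l : List Int) (x : Int) : Int :=
  (l.countP (pvW x) : Int) - (if pvW x x then 1 else 0)

def pvG (s : List Int) (x : Int) : Int :=
  if pvL x < x then (pvCnt s x : Int) - (pvCnt s (pvL x) : Int) - 1 else 0

def pvStepA (request : Int) (c : Int × Int) : Int :=
  let centaur_age := c.1
  let candidate_age := c.2
  if centaur_age > 100 ∧ candidate_age < 100 then request
  else if candidate_age > centaur_age then request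
  else if candidate_age ≤ PySem.Int.floordiv centaur_age 2 + 7 then request
  else request + 1

def pvStepB (s : List Int) (st : Int × Nat × Nat) (x : Int) : Int × Nat × Nat :=
  let hi := pvAdvance s st.2.1 x
  let L0 := PySem.Int.floordiv x 2 + 7
  let L := if x > 100 ∧ L0 < 99 then (99 : Int) else L0
  let lo := pvAdvance s st.2.2 L
  ((if L < x then st.1 + (hi : Int) - (lo : Int) - 1 else st.1), hi, lo)

-- ---- arithmetic and counting facts ----

theorem pvL_mono {x x' : Int} (h : x ≤ x') : pvL x ≤ pvL x' := by
  simp only [pvL, PySem.Int.floordiv_eq_ediv_of_pos (by omega : (0:Int) < 2)]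
  split_ifs <;> omega

theorem pvCnt_mono (l : List Int) {t t' : Int} (h : t ≤ t') : pvCnt l t ≤ pvCnt l t' := by
  apply List.countP_mono_left
  intro a _ ha
  simp at ha ⊢; omega

theorem pvCnt_le_length (l : List Int) (t : Int) : pvCnt l t ≤ l.length :=
  List.countP_le_length

-- on a sorted list, "s[i] ≤ t" is "i < (number of elements ≤ t)"
theorem pvCnt_sorted_iff {s : List Int} (hs : s.Pairwise (· ≤ ·)) (t : Int)
    (i : Nat) (hi : i < s.length) : s[i] ≤ t ↔ i < pvCnt s t := by
  have hpg := List.pairwise_iff_getElem.1 hs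
  constructor
  · intro h
    have hsplit : pvCnt s t
        = (s.take (i+1)).countP (fun y => decide (y ≤ t))
          + (s.drop (i+1)).countP (fun y => decide (y ≤ t)) := by
      rw [pvCnt, ← List.countP_append, List.take_append_drop]
    have htake : (s.take (i+1)).countP (fun y => decide (y ≤ t))
        = (s.take (i+1)).length := by
      rw [List.countP_eq_length]
      intro a ha
      obtain ⟨j, hj, rfl⟩ := List.mem_take_iff_getElem.1 ha
      have hj' : j < s.length := lt_of_lt_of_le hj (min_le_right _ _)
      have : s[j] ≤ s[i] := by
        rcases Nat.lt_or_ge j i with hlt | hge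
        · exact hpg j i hj' hi hlt
        · have : j = i := by omega
          subst this; exact le_refl _
      simp; omega
    have hlen : (s.take (i+1)).length = i + 1 := by simp; omega
    omega
  · intro h
    by_contra hgt
    have hsplit : pvCnt s t
        = (s.take i).countP (fun y => decide (y ≤ t))
          + (s.drop i).countP (fun y => decide (y ≤ t)) := by
      rw [pvCnt, ← List.countP_append, List.take_append_drop]
    have hdrop : (s.drop i).countP (fun y => decide (y ≤ t)) = 0 := by
      rw [List.countP_eq_zero]
      intro a ha
      obtain ⟨j, hj, rfl⟩ := List.getElem_of_mem ha
      rw [List.getElem_drop]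
      have hij : i + j < s.length := by simp at hj; omega
      have : s[i] ≤ s[i+j] := by
        rcases Nat.lt_or_ge i (i+j) with hlt | hge
        · exact hpg i (i+j) hi hij hlt
        · have : j = 0 := by omega
          subst this; exact le_refl _
      simp; omega
    have hlen : (s.take i).countP (fun y => decide (y ≤ t)) ≤ i := by
      calc (s.take i).countP (fun y => decide (y ≤ t))
          ≤ (s.take i).length := List.countP_le_length
        _ ≤ i := by simp
    omega

theorem pvAdvance_spec_aux {s : List Int} (hs : s.Pairwise (· ≤ ·)) (t : Int) :
    ∀ (k p : Nat), s.length - p ≤ k → p ≤ pvCnt s t → pvAdvance s p t = pvCnt s t := by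
  intro k
  induction k with
  | zero =>
    intro p hk hp
    have := pvCnt_le_length s t
    rw [pvAdvance]
    simp only [dif_neg (by omega : ¬ p < s.length)]
    omega
  | succ k ih =>
    intro p hk hp
    rw [pvAdvance]
    by_cases hlt : p < s.length
    · simp only [dif_pos hlt]
      by_cases hle : s[p] ≤ t
      · simp only [if_pos hle]
        have hpc : p < pvCnt s t := (pvCnt_sorted_iff hs t p hlt).1 hle
        exact ih (p+1) (by omega) (by omega)
      · simp only [if_neg hle]
        have : ¬ p < pvCnt s t := fun hc => hle ((pvCnt_sorted_iff hs t p hlt).2 hc)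
        omega
    · simp only [dif_neg hlt]
      have := pvCnt_le_length s t
      omega

theorem pvAdvance_spec {s : List Int} (hs : s.Pairwise (· ≤ ·)) (t : Int)
    {p : Nat} (hp : p ≤ pvCnt s t) : pvAdvance s p t = pvCnt s t :=
  pvAdvance_spec_aux hs t s.length p (by omega) hp

-- splitting the window count
theorem pvCnt_split (l : List Int) {x : Int} (h : pvL x ≤ x) :
    pvCnt l (pvL x) + l.countP (pvW x) = pvCnt l x := by
  induction l with
  | nil => simp [pvCnt]
  | cons y l ih =>
    simp only [pvCnt, pvW, List.countP_cons] at *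
    split_ifs <;> simp_all <;> omega

theorem pvCnt_w_zero (l : List Int) {x : Int} (h : x ≤ pvL x) :
    l.countP (pvW x) = 0 := by
  rw [List.countP_eq_zero]
  intro a _
  simp [pvW]; omega

theorem pvG_eq_pvF (s : List Int) (x : Int) : pvG s x = pvF s x := by
  by_cases h : pvL x < x
  · have := pvCnt_split s (le_of_lt h)
    simp only [pvG, pvF, if_pos h, pvW]
    have hx : decide (pvL x < x ∧ x ≤ x) = true := by simp; omega
    simp only [hx, if_true]
    omega
  · have hx : pvW x x = false := by simp [pvW]; omega
    simp only [pvG, pvF, if_neg h, hx, Bool.false_eq_true, if_false,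
      pvCnt_w_zero s (le_of_not_gt h)]
    simp

theorem pvF_perm {s l : List Int} (h : s.Perm l) (x : Int) : pvF s x = pvF l x := by
  simp [pvF, h.countP_eq]

-- ---- B: the two-pointer loop computes the per-element window sums ----

theorem pvStepB_eq (s : List Int) (hs : s.Pairwise (· ≤ ·)) (a : Int) (hi lo : Nat) (x : Int)
    (h1 : hi ≤ pvCnt s x) (h2 : lo ≤ pvCnt s (pvL x)) :
    pvStepB s (a, hi, lo) x
      = ((if pvL x < x then a + (pvCnt s x : Int) - (pvCnt s (pvL x) : Int) - 1 else a),
         pvCnt s x, pvCnt s (pvL x)) := by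
  simp only [pvStepB]
  rw [show (if x > 100 ∧ PySem.Int.floordiv x 2 + 7 < 99 then (99:Int)
        else PySem.Int.floordiv x 2 + 7) = pvL x from rfl]
  rw [pvAdvance_spec hs x h1, pvAdvance_spec hs (pvL x) h2]

theorem pvB_loop (s : List Int) (hs : s.Pairwise (· ≤ ·)) :
    ∀ (u : List Int) (a : Int) (hi lo : Nat), u.Pairwise (· ≤ ·) →
      (∀ x ∈ u, hi ≤ pvCnt s x ∧ lo ≤ pvCnt s (pvL x)) →
      (u.foldl (pvStepB s) (a, hi, lo)).1 = a + (u.map (pvG s)).sum := by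
  intro u
  induction u with
  | nil => intro a hi lo _ _; simp
  | cons x u ih =>
    intro a hi lo hu hbound
    obtain ⟨hx1, hx2⟩ := hbound x (List.mem_cons_self ..)
    have hhead := (List.pairwise_cons.1 hu).1
    have hutail := (List.pairwise_cons.1 hu).2
    rw [List.foldl_cons, pvStepB_eq s hs a hi lo x hx1 hx2]
    rw [ih _ _ _ hutail ?_]
    · have ha : (if pvL x < x then a + (pvCnt s x : Int) - (pvCnt s (pvL x) : Int) - 1 else a)
          = a + pvG s x := by
        simp only [pvG]; split_ifs with h
        · ring
        · ring
      rw [ha, List.map_cons, List.sum_cons]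
      ring
    · intro x' hx'
      have hle : x ≤ x' := hhead x' hx'
      exact ⟨pvCnt_mono s hle, pvCnt_mono s (pvL_mono hle)⟩

theorem pvB_eq (input : List Int) :
    count_friends_alt input
      = ((PySem.List.sorted input (fun x => x) false).map
          (pvG (PySem.List.sorted input (fun x => x) false))).sum := by
  have hs : (PySem.List.sorted input (fun x => x) false).Pairwise (· ≤ ·) := by
    have := PySem.List.sorted_pairwise (xs := input) (key := fun x => x)
    simpa using this
  have hrfl : count_friends_alt input
      = ((PySem.List.sorted input (fun x => x) false).foldl
          (pvStepB (PySem.List.sorted input (fun x => x) false)) ((0:Int), 0, 0)).1 := rfl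
  rw [hrfl, pvB_loop _ hs (PySem.List.sorted input (fun x => x) false) 0 0 0 hs
    (fun x _ => ⟨Nat.zero_le _, Nat.zero_le _⟩)]
  simp

-- ---- A: the candidate scan counts the same quantity ----

-- each candidate contributes 1 exactly when the window test pvW holds
theorem pvStepA_eq (r : Int) (c : Int × Int) :
    pvStepA r c = r + (if pvW c.1 c.2 then 1 else 0) := by
  rcases c with ⟨x, y⟩
  simp only [pvStepA, pvW, pvL, PySem.Int.floordiv_eq_ediv_of_pos (by omega : (0:Int) < 2)]
  split_ifs <;> simp_all <;> omega

theorem pvFoldA_sum (cs : List (Int × Int)) :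
    ∀ a : Int, cs.foldl pvStepA a
      = a + (cs.map (fun c => if pvW c.1 c.2 then (1:Int) else 0)).sum := by
  induction cs with
  | nil => intro a; simp
  | cons c cs ih => intro a; rw [List.foldl_cons, pvStepA_eq, ih]; simp; ring

-- the nested candidate-building loops as filter/map/flatMap
theorem pvInner_eq (d : List (Int × Int)) (c : Int × Int) :
    ∀ acc : List (Int × Int),
      d.foldl (fun cs' ca => if ca.1 == c.1 then cs' else cs' ++ [(c.2, ca.2)]) acc
        = acc ++ (d.filter (fun ca => !(ca.1 == c.1))).map (fun ca => (c.2, ca.2)) := by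
  induction d with
  | nil => intro acc; simp
  | cons ca d ih =>
    intro acc
    rw [List.foldl_cons]
    by_cases h : (ca.1 == c.1) = true
    · rw [if_pos h, ih, List.filter_cons_of_neg (by simpa using h)]
    · rw [if_neg h, ih, List.filter_cons_of_pos (by simpa using h)]
      simp

theorem pvCand_eq (d : List (Int × Int)) (e : List (Int × Int)) :
    ∀ (acc : List (Int × Int)),
      e.foldl (fun cs c =>
        d.foldl (fun cs' ca => if ca.1 == c.1 then cs' else cs' ++ [(c.2, ca.2)]) cs) acc
        = acc ++ e.flatMap (fun c =>
            (d.filter (fun ca => !(ca.1 == c.1))).map (fun ca => (c.2, ca.2))) := by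
  induction e with
  | nil => intro acc; simp
  | cons c e ih => intro acc; rw [List.foldl_cons, pvInner_eq, ih]; simp

theorem pvSum_flatMap {α β : Type} (e : List α) (g : α → List β) (h : β → Int) :
    ((e.flatMap g).map h).sum = (e.map (fun c => ((g c).map h).sum)).sum := by
  induction e with
  | nil => simp
  | cons c e ih => simp [ih]

theorem pvSum_ite_one (l : List (Int × Int)) (p : Int × Int → Bool) :
    (l.map (fun a => if p a then (1:Int) else 0)).sum = (l.countP p : Int) := by
  induction l with
  | nil => simp
  | cons a l ih => by_cases h : p a <;> simp [List.countP_cons, h, ih] <;> push_cast <;> ring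

theorem pvCountP_snd_enum (p : Int → Bool) (l : List Int) (s : Int) :
    (PySem.List.enumerate l s).countP (fun ca => p ca.2) = l.countP p := by
  induction l generalizing s with
  | nil => simp [PySem.List.enumerate_nil]
  | cons y l ih => simp [PySem.List.enumerate_cons, List.countP_cons, ih]

-- removing the one pair at index i removes one hit iff the value at i is a hit
theorem pvEnum_filter_countP (p : Int → Bool) (l : List Int) :
    ∀ (s i x : Int), (i, x) ∈ PySem.List.enumerate l s →
      ((PySem.List.enumerate l s).filter (fun ca => !(ca.1 == i))).countP (fun ca => p ca.2)
        + (if p x then 1 else 0) = l.countP p := by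
  induction l with
  | nil => intro s i x hm; simp [PySem.List.enumerate_nil] at hm
  | cons y l ih =>
    intro s i x hm
    rw [PySem.List.enumerate_cons] at hm ⊢
    rcases List.mem_cons.1 hm with heq | htail
    · have hi : i = s := congrArg Prod.fst heq
      have hx : x = y := congrArg Prod.snd heq
      subst hi hx
      rw [List.filter_cons_of_neg (by simp)]
      rw [List.filter_eq_self.2 (by
        intro a ha
        obtain ⟨k, hk, hpe⟩ := (PySem.List.mem_enumerate_iff _ _ _).1 ha
        have : a.1 = i + 1 + k := congrArg Prod.fst hpe
        simp only [Bool.not_eq_eq_eq_not, Bool.not_true, beq_eq_false_iff_ne, ne_eq]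
        omega), pvCountP_snd_enum, List.countP_cons]
    · have hibound : s + 1 ≤ i := by
        obtain ⟨k, hk, hpe⟩ := (PySem.List.mem_enumerate_iff _ _ _).1 htail
        have : i = s + 1 + k := congrArg Prod.fst hpe
        omega
      rw [List.filter_cons_of_pos (by simp; omega), List.countP_cons, List.countP_cons]
      have := ih (s+1) i x htail
      have hsnd : ((s, y).2) = y := rfl
      rw [hsnd]
      omega

theorem pvA_eq (input : List Int) :
    count_friends input = (input.map (pvF input)).sum := by
  have hc : count_friends input
      = (((PySem.List.enumerate input).foldl (fun cs c =>
            (PySem.List.enumerate input).foldl (fun cs' ca =>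
              if ca.1 == c.1 then cs' else cs' ++ [(c.2, ca.2)]) cs) [])).foldl pvStepA 0 := rfl
  rw [hc, pvCand_eq, List.nil_append, pvFoldA_sum, pvSum_flatMap]
  have hmap : (PySem.List.enumerate input).map (fun c =>
        ((((PySem.List.enumerate input).filter (fun ca => !(ca.1 == c.1))).map
          (fun ca => (c.2, ca.2))).map (fun c' => if pvW c'.1 c'.2 then (1:Int) else 0)).sum)
      = (PySem.List.enumerate input).map (fun c => pvF input c.2) := by
    apply List.map_congr_left
    intro c hcmem
    rw [List.map_map]
    have h1 : ((fun c' : Int × Int => if pvW c'.1 c'.2 then (1:Int) else 0)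
          ∘ (fun ca : Int × Int => (c.2, ca.2)))
        = fun ca : Int × Int => if pvW c.2 ca.2 then (1:Int) else 0 := rfl
    rw [h1, pvSum_ite_one]
    have hmem : (c.1, c.2) ∈ PySem.List.enumerate input 0 := by simpa using hcmem
    have hcount := pvEnum_filter_countP (pvW c.2) input 0 c.1 c.2 hmem
    simp only [pvF]
    by_cases hw : pvW c.2 c.2 = true <;> simp [hw] at hcount ⊢ <;> omega
  rw [hmap]
  have hsnd : (PySem.List.enumerate input).map (fun c => pvF input c.2)
      = ((PySem.List.enumerate input).map (·.2)).map (pvF input) := by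
    rw [List.map_map]; rfl
  rw [hsnd, PySem.List.map_snd_enumerate]
  omega

-- ---- the two programs agree ----

theorem pv_main (input : List Int) : count_friends input = count_friends_alt input := by
  have hperm : (PySem.List.sorted input (fun x => x) false).Perm input :=
    PySem.List.sorted_perm ..
  rw [pvA_eq, pvB_eq]
  have h1 : (PySem.List.sorted input (fun x => x) false).map
      (pvG (PySem.List.sorted input (fun x => x) false))
      = (PySem.List.sorted input (fun x => x) false).map (pvF input) := by
    apply List.map_congr_left
    intro x _
    rw [pvG_eq_pvF, pvF_perm hperm]
  rw [h1]
  exact ((hperm.map (pvF input)).sum_eq).symm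

-- ===== VERDICT (by name: the statement is the Claim_ definition above) =====
theorem count_friends_spec : Claim_equal_count_friends := by
  intro input _
  unfold Spec_count_friends
  exact pv_main input
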